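-- pv_equiv track=rewrite | github.com/MatinDeevv/Aphelion-nueral | data/mt5pipe/state/internal/windows.py | _gap_stats
-- ===== SOURCE A (Python) =====
-- def _gap_stats(
--     clock: str,
--     resolution_ms: int,
--     staleness: list[int | None],
--     gap_fill_flags: list[bool],
-- ) -> tuple[int, int]:
--     if clock.lower() == "tick":
--         gap_events = [int(value) for value in staleness if value is not None and int(value) > resolution_ms]
--         return len(gap_events), max(gap_events, default=0)
--     gap_count = 0
--     max_run = 0
--     current_run = 0
--     for flag in gap_fill_flags:
--         if flag:
--             current_run += 1
--             max_run = max(max_run, current_run)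
--         elif current_run:
--             gap_count += 1
--             current_run = 0
--     if current_run:
--         gap_count += 1
--     return gap_count, max_run * resolution_ms
-- ===== SOURCE B (Python) =====
-- def _gap_stats(
--     clock: str,
--     resolution_ms: int,
--     staleness: list,
--     gap_fill_flags: list,
-- ) -> tuple:
--     if clock.lower() == "tick":
--         gap_events = [int(value) for value in staleness if value is not None and int(value) > resolution_ms]
--         return len(gap_events), max(gap_events, default=0)
--     # two-pointer scan: extract the lengths of maximal runs of True, then aggregate
--     runs = []
--     i = 0
--     n = len(gap_fill_flags)
--     while i < n:
--         if gap_fill_flags[i]: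
--             j = i + 1
--             while j < n and gap_fill_flags[j]:
--                 j += 1
--             runs.append(j - i)
--             i = j
--         else:
--             i += 1
--     return len(runs), max(runs, default=0) * resolution_ms
-- ===== Notes on version B (the rewrite author's own statement) =====
-- stated objective: alternative
-- what changed: The running-counter-with-branches single pass over the flags is replaced by a two-pointer scan that first extracts the list of maximal True-run lengths and then aggregates count and maximum over that list.
import Mathlib
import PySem

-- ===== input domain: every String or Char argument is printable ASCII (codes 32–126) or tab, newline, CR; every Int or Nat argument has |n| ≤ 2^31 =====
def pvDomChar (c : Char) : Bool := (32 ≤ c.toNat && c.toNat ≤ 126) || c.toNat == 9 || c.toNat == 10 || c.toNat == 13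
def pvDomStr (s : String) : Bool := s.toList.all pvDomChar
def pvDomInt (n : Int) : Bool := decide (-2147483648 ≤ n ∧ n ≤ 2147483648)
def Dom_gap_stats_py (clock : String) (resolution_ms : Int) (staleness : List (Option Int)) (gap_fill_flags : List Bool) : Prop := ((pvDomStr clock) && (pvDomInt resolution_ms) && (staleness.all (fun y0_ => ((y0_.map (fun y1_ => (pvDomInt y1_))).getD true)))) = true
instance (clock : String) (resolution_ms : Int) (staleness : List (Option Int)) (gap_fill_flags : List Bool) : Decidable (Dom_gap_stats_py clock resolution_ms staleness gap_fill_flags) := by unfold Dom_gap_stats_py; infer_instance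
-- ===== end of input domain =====

-- B replaces A's running-counter single pass by a two-pointer extraction of the True-run
-- lengths followed by aggregation over that list (alternative decomposition, same cost).

-- ===== PORT A =====
-- the body of A's for-loop over gap_fill_flags (state: gap_count, max_run, current_run)
def gapStep (s : Int × Int × Int) (flag : Bool) : Int × Int × Int :=
  if flag then (s.1, max s.2.1 (s.2.2 + 1), s.2.2 + 1)
  else if s.2.2 ≠ 0 then (s.1 + 1, s.2.1, 0)
  else s

def gap_stats_py (clock : String) (resolution_ms : Int) (staleness : List (Option Int)) (gap_fill_flags : List Bool) : Int × Int :=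
  if PySem.Str.lower clock == "tick" then
    let gap_events := staleness.filterMap (fun v =>
      match v with
      | none => none
      | some x => if x > resolution_ms then some x else none)
    ((gap_events.length : Int), (PySem.List.max? gap_events (fun y => y)).getD 0)
  else
    let s := gap_fill_flags.foldl gapStep (0, 0, 0)
    (s.1 + (if s.2.2 ≠ 0 then 1 else 0), s.2.1 * resolution_ms)

-- ===== PORT B =====
-- the two-pointer while loops: outer position = remaining suffix, the inner while is
-- the takeWhile/dropWhile of the run of consecutive True flags starting at i
def altRuns (flags : List Bool) : List Int :=
  match flags with
  | [] => []
  | false :: rest => altRuns rest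
  | true :: rest =>
      ((1 + (rest.takeWhile (fun b => b)).length : Nat) : Int)
        :: altRuns (rest.dropWhile (fun b => b))
termination_by flags.length
decreasing_by
  · simp
  · have := List.length_dropWhile_le (p := fun b => b) (l := rest); simp; omega

def gap_stats_py_alt (clock : String) (resolution_ms : Int) (staleness : List (Option Int)) (gap_fill_flags : List Bool) : Int × Int :=
  if PySem.Str.lower clock == "tick" then
    let gap_events := staleness.filterMap (fun v =>
      match v with
      | none => none
      | some x => if x > resolution_ms then some x else none)
    ((gap_events.length : Int), (PySem.List.max? gap_events (fun y => y)).getD 0)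
  else
    let runs := altRuns gap_fill_flags
    ((runs.length : Int), ((PySem.List.max? runs (fun y => y)).getD 0) * resolution_ms)

-- ===== PRECONDITION & SPEC =====
def Spec_gap_stats_py (clock : String) (resolution_ms : Int) (staleness : List (Option Int)) (gap_fill_flags : List Bool) (out : Int × Int) : Prop := out = gap_stats_py_alt clock resolution_ms staleness gap_fill_flags
instance (clock : String) (resolution_ms : Int) (staleness : List (Option Int)) (gap_fill_flags : List Bool) (out : Int × Int) : Decidable (Spec_gap_stats_py clock resolution_ms staleness gap_fill_flags out) := by unfold Spec_gap_stats_py; infer_instance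

-- ===== CLAIM (what is proved, stated in full; the proofs are below) =====
def Claim_equal_gap_stats_py : Prop := ∀ (clock : String) (resolution_ms : Int) (staleness : List (Option Int)) (gap_fill_flags : List Bool), Dom_gap_stats_py clock resolution_ms staleness gap_fill_flags → Spec_gap_stats_py clock resolution_ms staleness gap_fill_flags (gap_stats_py clock resolution_ms staleness gap_fill_flags)

-- ===== LEMMAS AND PROOFS =====

-- a block of k consecutive True flags raises current_run by k and max_run accordingly
theorem foldl_gapStep_replicate (k : Nat) (rest : List Bool) (gc mr cr : Int)
    (h : cr ≤ mr) :
    (List.replicate k true ++ rest).foldl gapStep (gc, mr, cr)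
      = rest.foldl gapStep (gc, max mr (cr + k), cr + k) := by
  induction k generalizing mr cr with
  | zero => simp [max_eq_left h]
  | succ k ih =>
      rw [List.replicate_succ]
      simp only [List.cons_append, List.foldl_cons]
      have hstep : gapStep (gc, mr, cr) true = (gc, max mr (cr + 1), cr + 1) := by
        simp [gapStep]
      rw [hstep, ih (max mr (cr + 1)) (cr + 1) (le_max_right _ _)]
      have e1 : max (max mr (cr + 1)) (cr + 1 + (k : Int)) = max mr (cr + ((k : Nat) + 1 : Nat)) := by
        push_cast; omega
      have e2 : cr + 1 + (k : Int) = cr + ((k : Nat) + 1 : Nat) := by push_cast; ring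
      rw [e1, e2]

theorem altRuns_pos (flags : List Bool) : ∀ r ∈ altRuns flags, 1 ≤ r := by
  induction flags using altRuns.induct with
  | case1 => simp [altRuns]
  | case2 rest ih => rw [altRuns]; exact ih
  | case3 rest ih =>
      intro r hr
      rw [altRuns] at hr
      rcases List.mem_cons.mp hr with h | h
      · subst h; exact_mod_cast Nat.le_add_right 1 _
      · exact ih r h

-- A's whole else-branch (loop + trailing-run fixup) computes B's run statistics
theorem main_lemma (flags : List Bool) : ∀ (gc mr : Int), 0 ≤ mr →
    (let s := flags.foldl gapStep (gc, mr, 0)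
     ((s.1 + (if s.2.2 ≠ 0 then 1 else 0), s.2.1) : Int × Int))
      = (gc + (altRuns flags).length, (altRuns flags).foldl max mr) := by
  induction flags using altRuns.induct with
  | case1 => intro gc mr _; simp [altRuns]
  | case2 rest ih =>
      intro gc mr hmr
      have hstep : gapStep (gc, mr, 0) false = (gc, mr, 0) := by simp [gapStep]
      simp only [List.foldl_cons, hstep]
      rw [altRuns]
      exact ih gc mr hmr
  | case3 rest ih =>
      intro gc mr hmr
      obtain ⟨k, hk⟩ : ∃ k, (rest.takeWhile (fun b => b)).length = k := ⟨_, rfl⟩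
      have htw : rest.takeWhile (fun b => b) = List.replicate k true := by
        rw [← hk]
        apply List.eq_replicate_of_mem
        intro b hb
        simpa using List.mem_takeWhile_imp hb
      have hdecomp : (true :: rest) = List.replicate (k + 1) true ++ rest.dropWhile (fun b => b) := by
        rw [List.replicate_succ, List.cons_append]
        congr 1
        conv_lhs => rw [← List.takeWhile_append_dropWhile (p := fun b => b) (l := rest)]
        rw [htw]
      have hfold1 : (true :: rest).foldl gapStep (gc, mr, 0)
          = (rest.dropWhile (fun b => b)).foldl gapStep (gc, max mr ((k : Int) + 1), (k : Int) + 1) := by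
        conv_lhs => rw [hdecomp]
        rw [foldl_gapStep_replicate (k + 1) _ gc mr 0 hmr]
        have e : (0 : Int) + ((k + 1 : Nat) : Int) = (k : Int) + 1 := by push_cast; ring
        rw [e]
      have hAR : altRuns (true :: rest) = (((1 + k : Nat) : Int)) :: altRuns (rest.dropWhile (fun b => b)) := by
        rw [altRuns, hk]
      have hne : ((k : Int) + 1) ≠ 0 := by positivity
      rcases hrest : rest.dropWhile (fun b => b) with _ | ⟨b, t⟩
      · rw [hrest] at hfold1 hAR
        simp only [List.foldl_nil] at hfold1
        simp only [hfold1, hAR, altRuns, List.length_cons, List.length_nil, List.foldl_cons,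
          List.foldl_nil]
        rw [if_pos hne]
        refine Prod.ext ?_ ?_
        · simp only []; push_cast; omega
        · simp only []; push_cast; omega
      · -- dropWhile's head cannot satisfy the predicate
        have hb : b = false := by
          have hh := List.head?_dropWhile_not (p := fun b => b) (l := rest)
          rw [hrest] at hh
          simpa using hh
        subst hb
        rw [hrest] at hfold1 hAR
        have hstep : gapStep (gc, max mr ((k : Int) + 1), (k : Int) + 1) false
            = (gc + 1, max mr ((k : Int) + 1), 0) := by
          simp [gapStep, hne]
        conv at hfold1 => rhs; rw [List.foldl_cons, hstep]
        have hAR2 : altRuns (false :: t) = altRuns t := by rw [altRuns]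
        have ihh := ih (gc + 1) (max mr ((k : Int) + 1)) (le_trans hmr (le_max_left _ _))
        rw [hrest, hAR2] at ihh
        simp only [hfold1, hAR, hAR2, List.length_cons, List.foldl_cons]
        simp only at ihh
        have hstep0 : gapStep (gc + 1, max mr ((k : Int) + 1), 0) false
            = (gc + 1, max mr ((k : Int) + 1), 0) := by simp [gapStep]
        rw [List.foldl_cons, hstep0] at ihh
        have hc : ((1 + k : Nat) : Int) = (k : Int) + 1 := by push_cast; ring
        rw [hc, ihh]
        refine Prod.ext ?_ ?_
        · simp only []; push_cast; ring
        · rfl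

theorem foldl_max_eq_max?_getD (runs : List Int) (hpos : ∀ r ∈ runs, 1 ≤ r) :
    runs.foldl max 0 = (PySem.List.max? runs (fun y => y)).getD 0 := by
  cases runs with
  | nil => simp [PySem.List.max?]
  | cons x t =>
      rw [PySem.List.max?_id_cons]
      simp only [Option.getD_some, List.foldl_cons]
      have hx : (1 : Int) ≤ x := hpos x (by simp)
      rw [max_eq_right (by omega)]

theorem gap_stats_py_eq (clock : String) (resolution_ms : Int)
    (staleness : List (Option Int)) (gap_fill_flags : List Bool) :
    gap_stats_py clock resolution_ms staleness gap_fill_flags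
      = gap_stats_py_alt clock resolution_ms staleness gap_fill_flags := by
  unfold gap_stats_py gap_stats_py_alt
  split
  · rfl
  · have h := main_lemma gap_fill_flags 0 0 le_rfl
    simp only at h
    have hmax := foldl_max_eq_max?_getD (altRuns gap_fill_flags) (altRuns_pos _)
    have h1 := congrArg Prod.fst h
    have h2 := congrArg Prod.snd h
    simp only at h1 h2
    refine Prod.ext ?_ ?_
    · simpa using h1
    · simp only []
      rw [h2, hmax]

-- ===== VERDICT (by name: the statement is the Claim_ definition above) =====
theorem gap_stats_py_spec : Claim_equal_gap_stats_py := by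
  intro clock resolution_ms staleness gap_fill_flags _
  unfold Spec_gap_stats_py
  exact gap_stats_py_eq clock resolution_ms staleness gap_fill_flags
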